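-- pv_equiv track=rewrite | github.com/donatolab/SERBRA | Classes.py | filter_dict_by_properties
-- ===== SOURCE A (Python) =====
-- from typing import List, Union, Dict, Any, Tuple, Optional
--
-- def filter_strings_by_properties(
--     strings, include_properties=None, exclude_properties=None
-- ):
--     """
--     Filters a list of strings based on given properties.
--
--     Args:
--     - strings (list): List of strings to filter.
--     - include_properties (list or str, optional): List of properties to include in filtered strings.
--         Each property can be a string or a list of strings.
--     - exclude_properties (list or str, optional): List of properties to exclude from filtered strings.
--         Each property can be a string or a list of strings.
--
--     Returns:
--     - filtered_strings (list): List of strings filtered based on the given properties.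
--     """
--     filtered_strings = []
--
--     if include_properties:
--         if not isinstance(include_properties, list):
--             include_properties = [include_properties]
--         elif isinstance(include_properties, list) and all(
--             isinstance(prop, str) for prop in include_properties
--         ):
--             include_properties = [include_properties]
--
--     if exclude_properties:
--         if isinstance(exclude_properties, str):
--             exclude_properties = [exclude_properties]
--         elif isinstance(exclude_properties, list) and all(
--             isinstance(prop, str) for prop in exclude_properties
--         ):
--             exclude_properties = [exclude_properties]
--
--     for string in strings:
--         if include_properties:
--             # Check if any of the include properties lists are present in the string
--             include_check = any(
--                 all(prop.lower() in string.lower() for prop in props)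
--                 for props in include_properties
--             )
--         else:
--             include_check = True
--
--         if exclude_properties:
--             # Check if any of the exclude properties lists are present in the string
--             exclude_check = any(
--                 all(prop.lower() in string.lower() for prop in props)
--                 for props in exclude_properties
--             )
--         else:
--             exclude_check = False
--
--         # Only include the string if it matches include properties and does not match exclude properties
--         if include_check and not exclude_check:
--             filtered_strings.append(string)
--
--     return filtered_strings
--
-- def filter_dict_by_properties(
--     dictionary,
--     include_properties: List[List[str]] = None,  # or [str] or str
--     exclude_properties: List[List[str]] = None,  # or [str] or str):
-- ):
--     dict_keys = dictionary.keys()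
--     if include_properties or exclude_properties:
--         dict_keys = filter_strings_by_properties(
--             dict_keys,
--             include_properties=include_properties,
--             exclude_properties=exclude_properties,
--         )
--     filtered_dict = {key: dictionary[key] for key in dict_keys}
--     return filtered_dict
-- ===== SOURCE B (Python) =====
-- def filter_dict_by_properties(
--     dictionary,
--     include_properties=None,
--     exclude_properties=None,
-- ):
--     # Set-based staged algorithm: for each property group, narrow the key list
--     # pattern by pattern (an intersection pass), union the surviving keys per
--     # group into a set; keep = include-set minus exclude-set, then one
--     # membership pass over the items preserves the dict's order.
--     def matching_keys(groups, keys):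
--         hit = set()
--         for group in groups:
--             cand = keys
--             for p in group:
--                 pl = p.lower()
--                 cand = [k for k in cand if pl in k.lower()]
--             hit.update(cand)
--         return hit
--
--     keys = list(dictionary.keys())
--     inc = include_properties or []
--     exc = exclude_properties or []
--     inc_keys = matching_keys(inc, keys) if inc else set(keys)
--     exc_keys = matching_keys(exc, keys)
--     return {k: v for k, v in dictionary.items() if k in inc_keys and k not in exc_keys}
-- ===== Notes on version B (the rewrite author's own statement) =====
-- stated objective: faster
-- what changed: B replaces A's per-key any/all substring test (re-lowering every property for every key, then rebuilding the dict by lookup) with a set-based staged algorithm: each property group narrows the key list pattern by pattern in bulk list-comprehension passes, the survivors are unioned into an include set and an exclude set, and one final O(1)-membership pass over the items builds the result.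
import Mathlib
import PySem

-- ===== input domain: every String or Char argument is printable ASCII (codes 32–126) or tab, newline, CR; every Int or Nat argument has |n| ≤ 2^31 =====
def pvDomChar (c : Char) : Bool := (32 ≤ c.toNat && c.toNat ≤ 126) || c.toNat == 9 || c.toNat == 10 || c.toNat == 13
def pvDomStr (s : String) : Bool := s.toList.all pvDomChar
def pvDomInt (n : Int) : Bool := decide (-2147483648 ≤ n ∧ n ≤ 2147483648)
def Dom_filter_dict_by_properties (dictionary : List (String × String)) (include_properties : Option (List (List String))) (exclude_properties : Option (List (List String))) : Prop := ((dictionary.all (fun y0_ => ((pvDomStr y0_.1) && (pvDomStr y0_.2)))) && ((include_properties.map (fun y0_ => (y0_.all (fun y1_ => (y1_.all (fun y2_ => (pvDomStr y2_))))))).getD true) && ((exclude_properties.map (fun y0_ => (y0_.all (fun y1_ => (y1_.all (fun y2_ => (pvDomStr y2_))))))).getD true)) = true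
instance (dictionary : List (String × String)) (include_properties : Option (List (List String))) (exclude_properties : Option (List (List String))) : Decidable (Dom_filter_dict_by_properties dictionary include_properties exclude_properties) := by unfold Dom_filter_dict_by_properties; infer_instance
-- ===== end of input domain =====

-- B replaces A's per-key any/all test by a set-based staged algorithm: each
-- property group narrows the key list pattern by pattern, the survivors are
-- unioned into an include set (and an exclude set), and one membership pass
-- over the items keeps each key in the include set and not in the exclude set.

-- ===== PORT A =====
-- truthiness of an optional list argument ('if include_properties:')
def pyTruthy (o : Option (List (List String))) : Bool :=
  match o with
  | none => false
  | some l => !l.isEmpty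

-- port of A's helper filter_strings_by_properties; under the Lean types both
-- property arguments are already lists of lists of str, so A's isinstance
-- re-wrapping branches are identities and the normalized value is the input.
def filter_strings_by_properties (strings : List String)
    (include_properties exclude_properties : Option (List (List String))) : List String :=
  strings.foldl (fun filtered_strings string =>
    let include_check : Bool :=
      if pyTruthy include_properties then
        (include_properties.getD []).any (fun props =>
          props.all (fun prop => PySem.Str.isIn (PySem.Str.lower prop) (PySem.Str.lower string)))
      else true
    let exclude_check : Bool :=
      if pyTruthy exclude_properties then
        (exclude_properties.getD []).any (fun props =>
          props.all (fun prop => PySem.Str.isIn (PySem.Str.lower prop) (PySem.Str.lower string)))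
      else false
    if include_check && !exclude_check then filtered_strings ++ [string] else filtered_strings) []

def filter_dict_by_properties (dictionary : List (String × String)) (include_properties : Option (List (List String))) (exclude_properties : Option (List (List String))) : List (String × String) :=
  let d := PySem.Dict.ofList dictionary
  let dict_keys := d.keys
  let dict_keys :=
    if pyTruthy include_properties || pyTruthy exclude_properties then
      filter_strings_by_properties dict_keys include_properties exclude_properties
    else dict_keys
  -- {key: dictionary[key] for key in dict_keys}; every key is in d.keys, so
  -- dictionary[key] never raises and getD's default "" is unreachable
  (dict_keys.foldl (fun fd key => fd.insert key (d.getD key "")) PySem.Dict.empty).items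

-- ===== PORT B =====
-- B's helper matching_keys: per group, narrow the key list pattern by pattern,
-- then union the survivors into the hit set.
def pvMatchingKeys (groups : List (List String)) (keys : List String) : PySem.Set String :=
  groups.foldl (fun hit group =>
    PySem.Set.update hit
      (group.foldl (fun cand p =>
        let pl := PySem.Str.lower p
        cand.filter (fun k => PySem.Str.isIn pl (PySem.Str.lower k))) keys))
    PySem.Set.empty

def filter_dict_by_properties_alt (dictionary : List (String × String)) (include_properties : Option (List (List String))) (exclude_properties : Option (List (List String))) : List (String × String) :=
  let d := PySem.Dict.ofList dictionary
  let keys := d.keys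
  let inc := include_properties.getD []
  let exc := exclude_properties.getD []
  let inc_keys := if !inc.isEmpty then pvMatchingKeys inc keys else PySem.Set.ofList keys
  let exc_keys := pvMatchingKeys exc keys
  -- {k: v for k, v in dictionary.items() if k in inc_keys and k not in exc_keys}
  -- (membership-only consumption of the sets, so Python's set order is irrelevant)
  d.items.filter (fun kv => inc_keys.contains kv.1 && !exc_keys.contains kv.1)

-- ===== PRECONDITION & SPEC =====
def Spec_filter_dict_by_properties (dictionary : List (String × String)) (include_properties : Option (List (List String))) (exclude_properties : Option (List (List String))) (out : List (String × String)) : Prop := out = filter_dict_by_properties_alt dictionary include_properties exclude_properties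
instance (dictionary : List (String × String)) (include_properties : Option (List (List String))) (exclude_properties : Option (List (List String))) (out : List (String × String)) : Decidable (Spec_filter_dict_by_properties dictionary include_properties exclude_properties out) := by unfold Spec_filter_dict_by_properties; infer_instance

-- ===== CLAIM (what is proved, stated in full; the proofs are below) =====
def Claim_equal_filter_dict_by_properties : Prop := ∀ (dictionary : List (String × String)) (include_properties : Option (List (List String))) (exclude_properties : Option (List (List String))), Dom_filter_dict_by_properties dictionary include_properties exclude_properties → Spec_filter_dict_by_properties dictionary include_properties exclude_properties (filter_dict_by_properties dictionary include_properties exclude_properties)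

-- ===== LEMMAS AND PROOFS =====

-- the common per-key keep condition both ports compute
def pvKeep (inc exc : Option (List (List String))) (s : String) : Bool :=
  ((inc.getD []).isEmpty ||
    (inc.getD []).any (fun g =>
      g.all (fun p => PySem.Str.isIn (PySem.Str.lower p) (PySem.Str.lower s)))) &&
  !((exc.getD []).any (fun g =>
      g.all (fun p => PySem.Str.isIn (PySem.Str.lower p) (PySem.Str.lower s))))

-- A's per-key condition equals pvKeep
lemma pvKeep_eq (inc exc : Option (List (List String))) (s : String) :
    ((if pyTruthy inc then
        (inc.getD []).any (fun props =>
          props.all (fun prop => PySem.Str.isIn (PySem.Str.lower prop) (PySem.Str.lower s)))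
      else true) &&
     !(if pyTruthy exc then
        (exc.getD []).any (fun props =>
          props.all (fun prop => PySem.Str.isIn (PySem.Str.lower prop) (PySem.Str.lower s)))
      else false)) = pvKeep inc exc s := by
  cases inc with
  | none =>
    cases exc with
    | none => simp [pvKeep, pyTruthy]
    | some m => cases m <;> simp [pvKeep, pyTruthy]
  | some l =>
    cases exc with
    | none => cases l <;> simp [pvKeep, pyTruthy]
    | some m => cases l <;> cases m <;> simp [pvKeep, pyTruthy]

-- when both arguments are falsy the keep condition is trivially true
lemma pvKeep_true (inc exc : Option (List (List String)))
    (h : (pyTruthy inc || pyTruthy exc) = false) (s : String) : pvKeep inc exc s = true := by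
  rw [← pvKeep_eq]
  rcases Bool.or_eq_false_iff.mp h with ⟨h1, h2⟩
  simp [h1, h2]

-- the helper is a List.filter by A's condition, which equals pvKeep
lemma filter_strings_eq (strings : List String) (inc exc : Option (List (List String))) :
    filter_strings_by_properties strings inc exc = strings.filter (pvKeep inc exc) := by
  have h := PySem.List.foldl_append_if (fun string =>
      ((if pyTruthy inc then
          (inc.getD []).any (fun props =>
            props.all (fun prop => PySem.Str.isIn (PySem.Str.lower prop) (PySem.Str.lower string)))
        else true) &&
       !(if pyTruthy exc then
          (exc.getD []).any (fun props =>
            props.all (fun prop => PySem.Str.isIn (PySem.Str.lower prop) (PySem.Str.lower string)))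
        else false))) id strings []
  simp only [id_eq, List.map_id, List.nil_append] at h
  show List.foldl (fun filtered_strings string =>
      if ((if pyTruthy inc then
            (inc.getD []).any (fun props =>
              props.all (fun prop => PySem.Str.isIn (PySem.Str.lower prop) (PySem.Str.lower string)))
          else true) &&
         !(if pyTruthy exc then
            (exc.getD []).any (fun props =>
              props.all (fun prop => PySem.Str.isIn (PySem.Str.lower prop) (PySem.Str.lower string)))
          else false)) then filtered_strings ++ [string] else filtered_strings) [] strings
      = strings.filter (pvKeep inc exc)
  rw [h]
  exact List.filter_congr (fun x _ => pvKeep_eq inc exc x)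

-- rebuilding an association list from its filtered keys via lookup is filtering it
lemma assoc_bridge (l : List (String × String)) (p : String → Bool) (g : String → String)
    (hnd : (l.map Prod.fst).Nodup) (hg : ∀ kv ∈ l, g kv.1 = kv.2) :
    ((l.map Prod.fst).filter p).map (fun k => (k, g k)) = l.filter (fun kv => p kv.1) := by
  induction l with
  | nil => simp
  | cons kv t ih =>
    simp only [List.map_cons, List.nodup_cons] at hnd
    have hgh := hg kv (List.mem_cons_self)
    have iht := ih hnd.2 (fun x hx => hg x (List.mem_cons_of_mem _ hx))
    by_cases hp : p kv.1 = true
    · simp [hp, hgh, iht]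
    · simp [hp, iht]

-- A's port, reduced: a filter over the items by pvKeep
lemma a_eq_filter (dictionary : List (String × String))
    (inc exc : Option (List (List String))) :
    filter_dict_by_properties dictionary inc exc
      = (PySem.Dict.ofList dictionary).items.filter (fun kv => pvKeep inc exc kv.1) := by
  have hnd : ((PySem.Dict.ofList dictionary).items.map Prod.fst).Nodup :=
    PySem.Dict.nodup_keys_ofList dictionary
  have hg : ∀ kv ∈ (PySem.Dict.ofList dictionary).items,
      (PySem.Dict.ofList dictionary).getD kv.1 "" = kv.2 := by
    intro kv hkv
    rw [PySem.Dict.getD_eq_get?_getD,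
      PySem.Dict.get?_of_mem_items _ (by simpa using hkv) (PySem.Dict.nodup_keys_ofList dictionary)]
    rfl
  have main : ∀ p : String → Bool,
      (((PySem.Dict.ofList dictionary).keys.filter p).foldl
        (fun fd key => fd.insert key ((PySem.Dict.ofList dictionary).getD key ""))
        PySem.Dict.empty).items
      = (PySem.Dict.ofList dictionary).items.filter (fun kv => p kv.1) := by
    intro p
    rw [PySem.Dict.items_foldl_insert_fresh _ (fun key => key)
        (fun key => (PySem.Dict.ofList dictionary).getD key "") PySem.Dict.empty
        (fun a _ => PySem.Dict.contains_empty a)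
        (by
          simpa using hnd.sublist (List.filter_sublist
            (p := p) (l := List.map Prod.fst (PySem.Dict.ofList dictionary).items)))]
    have := assoc_bridge (PySem.Dict.ofList dictionary).items p
      (fun k => (PySem.Dict.ofList dictionary).getD k "") hnd hg
    simpa using this
  show ((if (pyTruthy inc || pyTruthy exc) = true then
      filter_strings_by_properties (PySem.Dict.ofList dictionary).keys inc exc
      else (PySem.Dict.ofList dictionary).keys).foldl
      (fun fd key => fd.insert key ((PySem.Dict.ofList dictionary).getD key ""))
      PySem.Dict.empty).items = _
  by_cases hc : (pyTruthy inc || pyTruthy exc) = true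
  · rw [if_pos hc, filter_strings_eq, main]
  · rw [if_neg hc]
    have hkeys : (PySem.Dict.ofList dictionary).keys
        = (PySem.Dict.ofList dictionary).keys.filter (fun _ => true) :=
      (List.filter_true _).symm
    rw [hkeys, main]
    exact (List.filter_congr (fun kv _ => by
      simp [pvKeep_true inc exc (Bool.eq_false_iff.mpr hc) kv.1])).symm

-- the staged per-group narrowing is a filter by the group's all-patterns test
lemma group_fold_eq_filter (group : List String) (keys : List String) :
    group.foldl (fun cand p =>
        cand.filter (fun k => PySem.Str.isIn (PySem.Str.lower p) (PySem.Str.lower k))) keys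
      = keys.filter (fun k =>
          group.all (fun p => PySem.Str.isIn (PySem.Str.lower p) (PySem.Str.lower k))) := by
  induction group generalizing keys with
  | nil => simp
  | cons p t ih =>
    simp only [List.foldl_cons, ih, List.filter_filter, List.all_cons]
    exact List.filter_congr (fun k _ => by rw [Bool.and_comm])

-- membership in a foldl of set-updates is membership in the accumulator or some stage
lemma mem_foldl_update {α β : Type} [BEq α] [LawfulBEq α]
    (F : β → List α) (gs : List β) (s : PySem.Set α) (x : α) :
    x ∈ gs.foldl (fun hit g => PySem.Set.update hit (F g)) s ↔
      x ∈ s ∨ ∃ g ∈ gs, x ∈ F g := by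
  induction gs generalizing s with
  | nil => simp
  | cons g t ih =>
    simp only [List.foldl_cons, ih, PySem.Set.mem_update, List.mem_cons]
    constructor
    · rintro ((h | h) | ⟨g', hg', hx⟩)
      · exact Or.inl h
      · exact Or.inr ⟨g, Or.inl rfl, h⟩
      · exact Or.inr ⟨g', Or.inr hg', hx⟩
    · rintro (h | ⟨g', (rfl | hg'), hx⟩)
      · exact Or.inl (Or.inl h)
      · exact Or.inl (Or.inr hx)
      · exact Or.inr ⟨g', hg', hx⟩

-- membership in B's hit set = key present and some group fully matches
lemma mem_matchingKeys (groups : List (List String)) (keys : List String) (k : String) :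
    k ∈ pvMatchingKeys groups keys ↔
      k ∈ keys ∧ groups.any (fun g =>
        g.all (fun p => PySem.Str.isIn (PySem.Str.lower p) (PySem.Str.lower k))) = true := by
  unfold pvMatchingKeys
  rw [mem_foldl_update]
  simp only [PySem.Set.empty, List.not_mem_nil, false_or, group_fold_eq_filter,
    List.mem_filter, List.any_eq_true]
  constructor
  · rintro ⟨g, hg, hk, hall⟩; exact ⟨hk, g, hg, hall⟩
  · rintro ⟨hk, g, hg, hall⟩; exact ⟨g, hg, hk, hall⟩

-- B's keep test agrees with pvKeep on every key of the dict
lemma alt_keep_eq (inc exc : Option (List (List String))) (keys : List String)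
    (k : String) (hk : k ∈ keys) :
    (((if !(inc.getD []).isEmpty then pvMatchingKeys (inc.getD []) keys
        else PySem.Set.ofList keys).contains k) &&
     !((pvMatchingKeys (exc.getD []) keys).contains k)) = pvKeep inc exc k := by
  have hmem : ∀ (gs : List (List String)),
      decide (k ∈ pvMatchingKeys gs keys)
        = gs.any (fun g =>
            g.all (fun p =>
              PySem.Chars.isIn (PySem.Chars.lower p.toList) (PySem.Chars.lower k.toList))) := by
    intro gs
    simp only [mem_matchingKeys, hk, true_and, List.any_eq_true, List.all_eq_true]
    rw [Bool.eq_iff_iff]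
    simp [List.any_eq_true, List.all_eq_true]
  unfold pvKeep
  by_cases hinc : (inc.getD []).isEmpty = true
  · simp [hinc, hk, hmem]
  · simp [hinc, hmem]

-- B's port, reduced: the same filter over the items by pvKeep
lemma alt_eq_filter (dictionary : List (String × String))
    (inc exc : Option (List (List String))) :
    filter_dict_by_properties_alt dictionary inc exc
      = (PySem.Dict.ofList dictionary).items.filter (fun kv => pvKeep inc exc kv.1) := by
  unfold filter_dict_by_properties_alt
  refine List.filter_congr (fun kv hkv => ?_)
  exact alt_keep_eq inc exc _ kv.1 (PySem.Dict.mem_keys_of_mem_items _ hkv)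

-- ===== VERDICT (by name: the statement is the Claim_ definition above) =====
theorem filter_dict_by_properties_spec : Claim_equal_filter_dict_by_properties := by
  intro dictionary inc exc _
  unfold Spec_filter_dict_by_properties
  rw [a_eq_filter, alt_eq_filter]
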